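-- pv_equiv track=rewrite | github.com/Skrjunior/Phython | Cvicenia/ntice_slovaa.py | zisti_slova
-- ===== SOURCE A (Python) =====
-- def zisti_slova(veta):
--    ntica=()
--    while (len(veta)>0 and veta.count(' ')>0):
--       pozicia=veta.find(' ')
--       if veta[pozicia-1].upper() in ('A'):
--          ntica=ntica+(veta[:pozicia],)
--       veta=veta[pozicia+1:]
--    return ntica
-- ===== SOURCE B (Python) =====
-- def zisti_slova(veta):
--     parts = veta.split(' ')
--     return tuple(p for p in parts[:-1] if p and p[-1] in 'aA')
-- ===== Notes on version B (the rewrite author's own statement) =====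
-- stated objective: simpler
-- what changed: B replaces A's while-loop of repeated count('/find('/slice passes over the shrinking string with a single split(' ') and one filter over the resulting segments.
-- intended difference: On strings that start with a space or contain two adjacent spaces and whose last character is 'a' or 'A', A's veta[pozicia-1] wraps around to the last character of the sentence and returns empty-string 'words'; B returns no empty words, which is the intended behaviour (an empty segment is not a word ending in a). — e.g. on zisti_slova(" a"): A returns [""], B returns []
import Mathlib
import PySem

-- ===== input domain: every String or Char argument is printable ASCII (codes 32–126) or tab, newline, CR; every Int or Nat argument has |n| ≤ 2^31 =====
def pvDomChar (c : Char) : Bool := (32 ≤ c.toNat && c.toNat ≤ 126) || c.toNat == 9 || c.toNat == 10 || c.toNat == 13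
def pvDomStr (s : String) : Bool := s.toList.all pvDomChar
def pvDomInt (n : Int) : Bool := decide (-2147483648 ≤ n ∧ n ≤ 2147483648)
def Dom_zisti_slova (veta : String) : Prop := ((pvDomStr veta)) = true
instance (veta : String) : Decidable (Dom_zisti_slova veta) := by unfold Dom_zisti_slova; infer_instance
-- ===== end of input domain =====

-- B replaces A's repeated count/find/slice loop with a single split(' ') pass and a filter;
-- on the D_ inputs below, A's veta[pozicia-1] wraparound collects empty strings and B intentionally does not.

-- ===== PORT A =====
-- A's while loop, one step per iteration; fuel = initial length + 1 bounds the iteration count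
-- (each iteration removes at least one character, so the fuel is never exhausted).
def zisti_slovaGo (fuel : Nat) (s : List Char) (acc : List (List Char)) : List (List Char) :=
  match fuel with
  | 0 => acc
  | fuel + 1 =>
    if 0 < s.length ∧ 0 < PySem.Chars.count s [' '] then
      let p := PySem.Chars.find s [' ']
      let acc' :=
        match PySem.List.pyGet? s (p - 1) with
        | some c =>
          if PySem.Chars.isIn (PySem.Chars.upper [c]) ['A'] then
            acc ++ [PySem.List.slice s none (some p)]
          else acc
        | none => acc
      zisti_slovaGo fuel (PySem.List.slice s (some (p + 1)) none) acc'
    else acc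

def zisti_slova (veta : String) : List String :=
  (zisti_slovaGo (veta.toList.length + 1) veta.toList []).map (fun w => String.ofList w)

-- ===== PORT B =====
def zisti_slova_alt (veta : String) : List String :=
  let parts := PySem.Chars.splitOn veta.toList [' ']
  ((PySem.List.slice parts none (some (-1))).filter
      (fun w => !w.isEmpty &&
        (match PySem.List.pyGet? w (-1) with
         | some c => PySem.Chars.isIn [c] ['a', 'A']
         | none => false))).map (fun w => String.ofList w)

-- ===== PRECONDITION & SPEC =====
-- On strings that start with a space or contain two adjacent spaces and whose last character is 'a' or 'A',
-- A's veta[pozicia-1] wraps around to the last character of the sentence and A returns empty-string "words";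
-- B returns no empty words, which is the intended behaviour (an empty segment is not a word ending in a).
-- linear scanner: does the string contain two adjacent spaces?
def pvAdj : List Char → Bool
  | x :: y :: t => (x == ' ' && y == ' ') || pvAdj (y :: t)
  | _ => false

def D_zisti_slova (veta : String) : Prop :=
  (veta.toList.head? = some ' ' ∨ pvAdj veta.toList = true) ∧
  (veta.toList.getLast? = some 'a' ∨ veta.toList.getLast? = some 'A')
instance (veta : String) : Decidable (D_zisti_slova veta) := by unfold D_zisti_slova; infer_instance

def Spec_zisti_slova (veta : String) (out : List String) : Prop := ¬ D_zisti_slova veta → out = zisti_slova_alt veta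
instance (veta : String) (out : List String) : Decidable (Spec_zisti_slova veta out) := by unfold Spec_zisti_slova; infer_instance

def pvDiffWitness_zisti_slova : String := " a"
def pvDiffWitnessOut_zisti_slova : (List String) × (List String) := ([""], [])

-- ===== CLAIM (what is proved, stated in full; the proofs are below) =====
def Claim_unchanged_zisti_slova : Prop := ∀ (veta : String), Dom_zisti_slova veta → Spec_zisti_slova veta (zisti_slova veta)
def Claim_changed_zisti_slova : Prop := Dom_zisti_slova (pvDiffWitness_zisti_slova) ∧ D_zisti_slova (pvDiffWitness_zisti_slova) ∧ zisti_slova (pvDiffWitness_zisti_slova) = pvDiffWitnessOut_zisti_slova.1 ∧ zisti_slova_alt (pvDiffWitness_zisti_slova) = pvDiffWitnessOut_zisti_slova.2 ∧ pvDiffWitnessOut_zisti_slova.1 ≠ pvDiffWitnessOut_zisti_slova.2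
def Claim_exact_zisti_slova : Prop := ∀ (veta : String), Dom_zisti_slova veta → D_zisti_slova veta → zisti_slova veta ≠ zisti_slova_alt veta

-- ===== LEMMAS AND PROOFS =====

def pvSp : List Char → List (List Char)
  | [] => [[]]
  | c :: t => if c = ' ' then [] :: pvSp t else (pvSp t).modifyHead (c :: ·)

theorem pvSp_ne_nil (l : List Char) : pvSp l ≠ [] := by
  cases l with
  | nil => simp [pvSp]
  | cons c t =>
    simp only [pvSp]
    split
    · simp
    · cases h : pvSp t with
      | nil => exact absurd h (pvSp_ne_nil t)
      | cons a r => simp [List.modifyHead]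

theorem pvCount_single (ch : Char) : ∀ (fuel : Nat) (l : List Char) (acc : Nat), l.length ≤ fuel →
    PySem.Chars.count.go [ch] fuel l acc = acc + l.count ch := by
  intro fuel
  induction fuel with
  | zero =>
    intro l acc h
    have : l = [] := List.eq_nil_of_length_eq_zero (Nat.le_zero.mp h)
    subst this
    simp [PySem.Chars.count.go]
  | succ f ih =>
    intro l acc h
    cases l with
    | nil => simp [PySem.Chars.count.go]
    | cons c t =>
      simp only [PySem.Chars.count.go]
      by_cases hc : ch = c
      · subst hc
        rw [if_pos (by simp [List.isPrefixOf])]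
        simp only [List.length_cons, List.length_nil, List.drop_succ_cons, List.drop_zero]
        rw [ih _ _ (by simpa using h)]
        rw [List.count_cons_self]
        omega
      · rw [if_neg (by simp [List.isPrefixOf]; exact fun hh => hc hh)]
        rw [ih _ _ (by simpa using h)]
        rw [List.count_cons_of_ne (fun hh => hc (Eq.symm hh))]

theorem pvCount_space (s : List Char) : PySem.Chars.count s [' '] = s.count ' ' := by
  unfold PySem.Chars.count
  rw [if_neg (by simp), pvCount_single ' ' s.length s 0 le_rfl]
  omega

theorem pvSplitOn_go : ∀ (fuel : Nat) (l cur : List Char) (acc : List (List Char)), l.length < fuel →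
    PySem.Chars.splitOn.go [' '] fuel l cur acc
      = acc.reverse ++ (pvSp l).modifyHead (cur.reverse ++ ·) := by
  intro fuel
  induction fuel with
  | zero => intro l cur acc h; omega
  | succ f ih =>
    intro l cur acc h
    cases l with
    | nil => simp [PySem.Chars.splitOn.go, pvSp]
    | cons c t =>
      simp only [PySem.Chars.splitOn.go]
      by_cases hc : c = ' '
      · subst hc
        rw [if_pos (by simp [List.isPrefixOf])]
        rw [ih _ _ _ (by simpa using h)]
        simp [pvSp]
        cases hh : pvSp t with
        | nil => exact absurd hh (pvSp_ne_nil t)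
        | cons a r => simp [List.modifyHead]
      · rw [if_neg (by simp [List.isPrefixOf, Ne.symm hc])]
        rw [ih _ _ _ (by simpa using h)]
        simp [pvSp, hc]
        cases hh : pvSp t with
        | nil => exact absurd hh (pvSp_ne_nil t)
        | cons a r => simp [List.modifyHead]

theorem pvSplitOn_space (l : List Char) : PySem.Chars.splitOn l [' '] = pvSp l := by
  unfold PySem.Chars.splitOn
  rw [pvSplitOn_go (l.length + 1) l [] [] (by omega)]
  cases hh : pvSp l with
  | nil => exact absurd hh (pvSp_ne_nil l)
  | cons a r => simp [List.modifyHead]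

theorem pvSp_no_space (l : List Char) (h : ' ' ∉ l) : pvSp l = [l] := by
  induction l with
  | nil => rfl
  | cons c t ih =>
    simp only [List.mem_cons, not_or] at h
    have hc : ¬ c = ' ' := fun hh => h.1 hh.symm
    simp only [pvSp, if_neg hc, ih h.2, List.modifyHead]

theorem pvSp_append (pre suf : List Char) (h : ' ' ∉ pre) :
    pvSp (pre ++ ' ' :: suf) = pre :: pvSp suf := by
  induction pre with
  | nil => simp [pvSp]
  | cons c t ih =>
    simp only [List.mem_cons, not_or] at h
    have hc : ¬ c = ' ' := fun hh => h.1 hh.symm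
    simp only [List.cons_append, pvSp, if_neg hc, ih h.2, List.modifyHead]

theorem pvAdj_cons (x : Char) (l : List Char) :
    pvAdj (x :: l) = ((x == ' ' && (l.head? == some ' ')) || pvAdj l) := by
  cases l with
  | nil => simp [pvAdj]
  | cons y t => simp [pvAdj]

theorem pvAdj_append (pre suf : List Char) (h : ' ' ∉ pre) :
    pvAdj (pre ++ ' ' :: suf) = ((suf.head? == some ' ') || pvAdj suf) := by
  induction pre with
  | nil => simp [pvAdj_cons]
  | cons c t ih =>
    simp only [List.mem_cons, not_or] at h
    rw [List.cons_append, pvAdj_cons, ih h.2]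
    have hc : ¬ c = ' ' := fun hh => h.1 hh.symm
    simp [hc]


theorem pvSpaceInfix (s : List Char) (h : ' ' ∈ s) : [' '] <:+: s := by
  obtain ⟨l, r, rfl⟩ := List.append_of_mem h
  exact ⟨l, r, by simp⟩

theorem pvFind_decomp (s : List Char) (h : ' ' ∈ s) :
    0 ≤ PySem.Chars.find s [' '] ∧
    (PySem.Chars.find s [' ']).toNat < s.length ∧
    s = s.take (PySem.Chars.find s [' ']).toNat ++ ' ' :: s.drop ((PySem.Chars.find s [' ']).toNat + 1) ∧
    ' ' ∉ s.take (PySem.Chars.find s [' ']).toNat := by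
  have h0 : 0 ≤ PySem.Chars.find s [' '] := (PySem.Chars.find_nonneg_iff s [' ']).mpr (pvSpaceInfix s h)
  obtain ⟨hpfx, hmin⟩ := PySem.Chars.find_spec (s := s) (sub := [' ']) h0
  set k := (PySem.Chars.find s [' ']).toNat with hk
  have hklen : k < s.length := by
    by_contra hge
    rw [List.drop_eq_nil_of_le (by omega)] at hpfx
    simp at hpfx
  have hdrop : s.drop k = s[k] :: s.drop (k + 1) := List.drop_eq_getElem_cons hklen
  have hsk : s[k] = ' ' := by
    rw [hdrop, List.prefix_cons_iff] at hpfx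
    rcases hpfx with hh | ⟨t, hh, _⟩
    · simp at hh
    · exact (List.cons.injEq _ _ _ _ ▸ hh).1.symm
  refine ⟨h0, hklen, ?_, ?_⟩
  · conv_lhs => rw [← List.take_append_drop k s]
    rw [hdrop, hsk]
  · intro hmem
    obtain ⟨i, hi, hie⟩ := List.getElem_of_mem hmem
    have hilen : i < s.length := by
      have := List.length_take_le k s
      omega
    have hikk : i < k := by
      have : (s.take k).length = min k s.length := List.length_take
      omega
    rw [List.getElem_take] at hie
    exact hmin i hikk (by rw [List.drop_eq_getElem_cons hilen, hie]; exact List.prefix_cons_iff.mpr (Or.inr ⟨[], rfl, List.nil_prefix⟩))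

theorem pvAdj_mem : ∀ (s : List Char), pvAdj s = true → ' ' ∈ s := by
  intro s
  induction s with
  | nil => intro h; simp [pvAdj] at h
  | cons x t ih =>
    intro h
    rw [pvAdj_cons] at h
    simp only [Bool.or_eq_true, Bool.and_eq_true, beq_iff_eq] at h
    rcases h with ⟨rfl, _⟩ | h
    · simp
    · exact List.mem_cons_of_mem _ (ih h)

theorem pvMemNil : ∀ (n : Nat) (s : List Char), s.length ≤ n →
    ([] ∈ (pvSp s).dropLast ↔ (s.head? = some ' ' ∨ pvAdj s = true)) := by
  intro n
  induction n with
  | zero =>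
    intro s hlen
    have : s = [] := List.eq_nil_of_length_eq_zero (Nat.le_zero.mp hlen)
    subst this
    simp [pvSp, pvAdj]
  | succ n ih =>
    intro s hlen
    by_cases hm : ' ' ∈ s
    · obtain ⟨h0, hklen, hs, hpre⟩ := pvFind_decomp s hm
      set k := (PySem.Chars.find s [' ']).toNat
      set pre := s.take k with hpredef
      set suf := s.drop (k+1) with hsufdef
      have hsuflen : suf.length ≤ n := by
        have := congrArg List.length hs
        simp at this
        omega
      have hsp : pvSp s = pre :: pvSp suf := by
        conv_lhs => rw [hs]
        exact pvSp_append pre suf hpre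
      have hadj : pvAdj s = ((suf.head? == some ' ') || pvAdj suf) := by
        conv_lhs => rw [hs]
        exact pvAdj_append pre suf hpre
      have hhead : s.head? = (pre ++ ' ' :: suf).head? := by rw [← hs]
      rw [hsp, List.dropLast_cons_of_ne_nil (pvSp_ne_nil suf), hadj, hhead]
      cases hpc : pre with
      | nil => simp
      | cons c t =>
        have hcne : c ≠ ' ' := by
          intro hh
          exact hpre (by rw [hpc, hh]; simp)
        simp only [List.mem_cons, List.head?_cons]
        rw [ih suf hsuflen]
        simp [hcne]
    · have hsp : pvSp s = [s] := pvSp_no_space s hm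
      rw [hsp]
      simp only [List.dropLast_singleton, List.not_mem_nil, false_iff]
      intro hh
      rcases hh with hh | hh
      · rcases List.head?_eq_some_iff.mp hh with ⟨t, rfl⟩
        exact hm (by simp)
      · exact hm (pvAdj_mem s hh)

def pvAA (c : Char) : Bool := c == 'a' || c == 'A'

theorem pvChar_toNat_inj {c d : Char} (h : c.toNat = d.toNat) : c = d :=
  Char.ext (UInt32.toNat_inj.mp h)

theorem pvIsIn_upper_A (c : Char) : PySem.Chars.isIn (PySem.Chars.upper [c]) ['A'] = pvAA c := by
  have key : PySem.Chars.upperChar c = 'A' ↔ (c = 'a' ∨ c = 'A') := by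
    unfold PySem.Chars.upperChar PySem.Chars.islower
    constructor
    · intro h
      split at h
      · next hl =>
        simp only [Bool.and_eq_true, decide_eq_true_eq, Char.le_def, UInt32.le_iff_toNat_le] at hl
        have h97 : 97 ≤ c.toNat := hl.1
        have h122 : c.toNat ≤ 122 := hl.2
        have hv : (c.toNat - 32).isValidChar := Or.inl (by omega)
        have := congrArg Char.toNat h
        rw [Char.toNat_ofNat, if_pos hv] at this
        left
        have hA : ('A' : Char).toNat = 65 := by decide
        have ha : ('a' : Char).toNat = 97 := by decide
        exact pvChar_toNat_inj (by omega)
      · exact Or.inr h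
    · rintro (rfl | rfl) <;> simp
  have : PySem.Chars.upper [c] = [PySem.Chars.upperChar c] := rfl
  rw [this]
  by_cases h : PySem.Chars.upperChar c = 'A'
  · have := key.mp h
    rcases this with rfl | rfl <;>
      simp_all [PySem.Chars.isIn, PySem.Chars.find, PySem.Chars.find.go, List.isPrefixOf, pvAA]
  · have hne : ¬ (c = 'a' ∨ c = 'A') := fun hc => h (key.mpr hc)
    push Not at hne
    simp [PySem.Chars.isIn, PySem.Chars.find, PySem.Chars.find.go, List.isPrefixOf, h, pvAA, hne.1, hne.2]


def pvCondA (L : Option Char) (w : List Char) : Bool :=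
  match w.getLast? with
  | some c => pvAA c
  | none => match L with
            | some c => pvAA c
            | none => false

theorem pvGoA : ∀ (fuel : Nat) (s : List Char), s.length < fuel → ∀ (acc : List (List Char)),
    zisti_slovaGo fuel s acc = acc ++ ((pvSp s).dropLast.filter (pvCondA s.getLast?)) := by
  intro fuel
  induction fuel with
  | zero => intro s h; omega
  | succ f ih =>
    intro s hlen acc
    simp only [zisti_slovaGo]
    by_cases hcond : 0 < s.length ∧ 0 < PySem.Chars.count s [' ']
    · rw [if_pos hcond]
      have hm : ' ' ∈ s := List.count_pos_iff.mp (by rw [← pvCount_space]; exact hcond.2)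
      obtain ⟨h0, hklen, hs, hpre⟩ := pvFind_decomp s hm
      set p := PySem.Chars.find s [' '] with hpdef
      set k := p.toNat with hkdef
      set pre := s.take k with hpredef
      set suf := s.drop (k+1) with hsufdef
      have hp : p = (k : Int) := (Int.toNat_of_nonneg h0).symm
      have hslice1 : PySem.List.slice s (some (p + 1)) none = suf := by
        rw [PySem.List.slice_from s (by omega : (0:Int) ≤ p + 1)]
        have : (p + 1).toNat = k + 1 := by omega
        rw [this]
      have hslice2 : PySem.List.slice s none (some p) = pre := by
        rw [PySem.List.slice_to s h0]
      have hsuflen : suf.length < f := by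
        have := congrArg List.length hs
        simp at this
        omega
      have hsp : pvSp s = pre :: pvSp suf := by
        conv_lhs => rw [hs]
        exact pvSp_append pre suf hpre
      have hlast : suf ≠ [] → s.getLast? = suf.getLast? := by
        intro hne
        conv_lhs => rw [hs]
        rw [List.getLast?_append]
        cases hsx : suf with
        | nil => exact absurd hsx hne
        | cons a r => simp [List.getLast?_cons]
      -- the character A inspects
      have hchar : ∃ c : Char, PySem.List.pyGet? s (p - 1) = some c ∧ pvCondA s.getLast? pre = pvAA c := by
        by_cases hk0 : k = 0
        · have hpm : p - 1 = -1 := by omega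
          rw [hpm, PySem.List.pyGet?_neg_one]
          have hne : s ≠ [] := List.ne_nil_of_length_pos hcond.1
          obtain ⟨c, hc⟩ := Option.isSome_iff_exists.mp (Option.isSome_iff_ne_none.mpr (mt List.getLast?_eq_none_iff.mp hne))
          refine ⟨c, hc, ?_⟩
          have : pre = [] := by rw [hpredef, hk0]; simp
          rw [this, hc]
          rfl
        · have hpm : p - 1 = ((k - 1 : Nat) : Int) := by omega
          rw [hpm, PySem.List.pyGet?_natCast]
          have hk1 : k - 1 < s.length := by omega
          refine ⟨s[k-1], by rw [List.getElem?_eq_getElem hk1], ?_⟩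
          have hprelast : pre.getLast? = some s[k-1] := by
            rw [List.getLast?_eq_getElem?]
            have hlenpre : pre.length = k := by
              rw [hpredef]; simp; omega
            rw [hlenpre, List.getElem?_take, if_pos (by omega), List.getElem?_eq_getElem hk1]
          simp [pvCondA, hprelast]
      obtain ⟨c, hc, hcA⟩ := hchar
      rw [hslice1, hslice2]
      simp only [hc, pvIsIn_upper_A]
      rw [ih suf hsuflen]
      rw [hsp, List.dropLast_cons_of_ne_nil (pvSp_ne_nil suf), List.filter_cons]
      by_cases hsufnil : suf = []
      · rw [hsufnil]
        simp only [pvSp, List.dropLast_singleton, List.filter_nil]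
        cases hb : pvAA c
        · rw [hcA, hb]
          simp
        · rw [hcA, hb]
          simp
      · rw [← hlast hsufnil, hcA]
        cases hb : pvAA c <;> simp
    · rw [if_neg hcond]
      rcases Nat.eq_zero_or_pos s.length with hz | hpos
      · have : s = [] := List.eq_nil_of_length_eq_zero hz
        subst this
        simp [pvSp]
      · have hcnt : PySem.Chars.count s [' '] = 0 := by omega
        have hm : ' ' ∉ s := by
          intro hmem
          have := List.count_pos_iff.mpr hmem
          rw [← pvCount_space] at this
          omega
        rw [pvSp_no_space s hm]
        simp


theorem pvIsIn_aA (c : Char) : PySem.Chars.isIn [c] ['a', 'A'] = pvAA c := by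
  by_cases h1 : c = 'a' <;> by_cases h2 : c = 'A' <;>
    simp_all [PySem.Chars.isIn, PySem.Chars.find, PySem.Chars.find.go, List.isPrefixOf, pvAA]

def pvCondB (w : List Char) : Bool :=
  match w.getLast? with
  | some c => !w.isEmpty && pvAA c
  | none => false

theorem pvA_eq (veta : String) :
    zisti_slova veta
      = (((pvSp veta.toList).dropLast.filter (pvCondA veta.toList.getLast?)).map (fun w => String.ofList w)) := by
  unfold zisti_slova
  rw [pvGoA (veta.toList.length + 1) veta.toList (by omega) []]
  rw [List.nil_append]

theorem pvB_eq (veta : String) :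
    zisti_slova_alt veta
      = (((pvSp veta.toList).dropLast.filter pvCondB).map (fun w => String.ofList w)) := by
  unfold zisti_slova_alt
  simp only [pvSplitOn_space, PySem.List.slice_to_neg_one]
  congr 1
  apply List.filter_congr
  intro w _
  cases hw : w with
  | nil => simp [pvCondB]
  | cons a t =>
    have hne : (a :: t) ≠ ([] : List Char) := by simp
    obtain ⟨c, hc⟩ := Option.isSome_iff_exists.mp (Option.isSome_iff_ne_none.mpr (mt List.getLast?_eq_none_iff.mp hne))
    rw [PySem.List.pyGet?_neg_one, hc]
    simp only [pvIsIn_aA]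
    simp [pvCondB, hc]

-- elements picked by B are nonempty
theorem pvCondB_ne_nil (w : List Char) (h : pvCondB w = true) : w ≠ [] := by
  intro hw
  rw [hw] at h
  simp [pvCondB] at h

-- ===== VERDICT (by name: the statement is the Claim_ definition above) =====
theorem zisti_slova_spec : Claim_unchanged_zisti_slova := by
  unfold Claim_unchanged_zisti_slova
  intro veta _ hD
  rw [pvA_eq, pvB_eq]
  congr 1
  apply List.filter_congr
  intro w hw
  cases hlw : w.getLast? with
  | some c =>
    have hne : w ≠ [] := by
      intro hww
      rw [hww] at hlw
      simp at hlw
    have : w.isEmpty = false := by simpa [List.isEmpty_iff] using hne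
    simp [pvCondA, pvCondB, hlw, this]
  | none =>
    have hwnil : w = [] := List.getLast?_eq_none_iff.mp hlw
    subst hwnil
    have hfst : veta.toList.head? = some ' ' ∨ pvAdj veta.toList = true :=
      (pvMemNil veta.toList.length veta.toList le_rfl).mp hw
    have hsnd : ¬ (veta.toList.getLast? = some 'a' ∨ veta.toList.getLast? = some 'A') := by
      intro hh
      exact hD ⟨hfst, hh⟩
    simp only [pvCondA, pvCondB]
    cases hgl : veta.toList.getLast? with
    | none => rfl
    | some c =>
      have hca : ¬ (c = 'a' ∨ c = 'A') := by
        intro hh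
        rcases hh with rfl | rfl <;> exact hsnd (by simp [hgl])
      simp only [pvAA]
      have h1 : (c == 'a') = false := by
        simpa using fun h => hca (Or.inl h)
      have h2 : (c == 'A') = false := by
        simpa using fun h => hca (Or.inr h)
      rw [h1, h2]
      rfl

theorem zisti_slova_changed : Claim_changed_zisti_slova := by
  unfold Claim_changed_zisti_slova; decide

theorem zisti_slova_tight : Claim_exact_zisti_slova := by
  unfold Claim_exact_zisti_slova
  intro veta _ hD heq
  rw [pvA_eq, pvB_eq] at heq
  -- "" is in A's output
  have hmemnil : ([] : List Char) ∈ (pvSp veta.toList).dropLast :=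
    (pvMemNil veta.toList.length veta.toList le_rfl).mpr hD.1
  have hcond : pvCondA veta.toList.getLast? [] = true := by
    rcases hD.2 with h2 | h2 <;> simp [pvCondA, h2, pvAA]
  have hmemA : ("" : String) ∈ ((pvSp veta.toList).dropLast.filter (pvCondA veta.toList.getLast?)).map (fun w => String.ofList w) := by
    refine List.mem_map.mpr ⟨[], List.mem_filter.mpr ⟨hmemnil, hcond⟩, by decide⟩
  rw [heq] at hmemA
  obtain ⟨w, hwmem, hwval⟩ := List.mem_map.mp hmemA
  have hwnil : w = [] := by
    have := congrArg String.toList hwval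
    simpa using this
  exact pvCondB_ne_nil w (List.mem_filter.mp hwmem).2 hwnil
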